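-- pv_equiv track=rewrite | github.com/ralskwo/CodingTest | BAEKJOON/이분 탐색/보석 상자/보석 상자.py | find_min_jealousy
-- ===== SOURCE A (Python) =====
-- def can_distribute(j, jewel_counts, n):
--     # 주어진 질투심 j로 보석을 n명에게 나눌 수 있는지 확인하는 함수
--     total_students = 0  # 필요한 학생 수를 초기화
--     for count in jewel_counts:
--         # 각 색상마다 보석을 주어진 질투심 기준으로 나누는 학생 수 계산
--         total_students += -(-count // j)  # math.ceil(count / j)와 동일
--         if total_students > n:
--             # 필요한 학생 수가 n보다 크면 나눌 수 없음
--             return False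
--     return True
--
-- def find_min_jealousy(n, m, jewel_counts):
--     # 질투심의 최소값을 찾는 함수 (이진 탐색)
--     left, right = 1, max(jewel_counts)  # 초기 범위 설정
--     while left < right:
--         mid = (left + right) // 2  # 중간값 계산
--         if can_distribute(mid, jewel_counts, n):
--             right = mid  # 나눌 수 있으면 범위를 줄임
--         else:
--             left = mid + 1  # 나눌 수 없으면 범위를 늘림
--     return left
-- ===== SOURCE B (Python) =====
-- def find_min_jealousy(n, m, jewel_counts):
--     # Bisection re-cast as recursion over (lo, width) instead of (left, right),
--     # with a staged feasibility test: build the list of running per-colour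
--     # student totals (using the (c + j - 1) // j ceiling), then check all <= n.
--     def feasible(j):
--         prefix = []
--         t = 0
--         for c in jewel_counts:
--             t += (c + j - 1) // j
--             prefix.append(t)
--         return all(p <= n for p in prefix)
--
--     def search(lo, width):
--         if width <= 0:
--             return lo
--         half = width // 2
--         mid = lo + half
--         if feasible(mid):
--             return search(lo, half)
--         return search(mid + 1, width - half - 1)
--
--     return search(1, max(jewel_counts) - 1)
-- ===== Notes on version B (the rewrite author's own statement) =====
-- stated objective: alternative
-- what changed: The while-loop over (left,right) becomes recursion over (lo,width) with half-width arithmetic, and the early-exit accumulating feasibility test becomes two staged passes (build the list of running prefix totals with the (c+j-1)//j ceiling, then all(p <= n)).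
import Mathlib
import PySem

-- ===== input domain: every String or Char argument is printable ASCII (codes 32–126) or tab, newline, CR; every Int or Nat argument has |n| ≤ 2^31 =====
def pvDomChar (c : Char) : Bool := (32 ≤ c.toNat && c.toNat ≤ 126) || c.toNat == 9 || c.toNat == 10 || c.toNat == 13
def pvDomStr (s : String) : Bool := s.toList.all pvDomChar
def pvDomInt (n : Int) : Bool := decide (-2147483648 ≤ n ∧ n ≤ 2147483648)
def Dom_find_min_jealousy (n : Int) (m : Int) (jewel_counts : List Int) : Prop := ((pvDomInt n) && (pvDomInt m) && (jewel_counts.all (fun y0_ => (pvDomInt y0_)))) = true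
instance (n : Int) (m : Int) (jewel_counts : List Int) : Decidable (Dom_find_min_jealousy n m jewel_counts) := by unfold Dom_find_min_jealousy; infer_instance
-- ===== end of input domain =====

-- B recasts the bisection as recursion over (lo, width) and replaces the
-- early-exit accumulating feasibility test by two staged passes (alternative, same cost).

-- ===== PORT A =====
-- Iterative binary search over (left, right) with an accumulating early-exit test.
def canDistributeGo (j : Int) (n : Int) (total : Int) : List Int → Bool
  | [] => true
  | count :: rest =>
      let t := total + (-(PySem.Int.floordiv (-count) j))
      if t > n then false else canDistributeGo j n t rest

def can_distribute (j : Int) (jewel_counts : List Int) (n : Int) : Bool :=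
  canDistributeGo j n 0 jewel_counts

def findLoop (n : Int) (jewel_counts : List Int) (left right : Int) : Int :=
  if h : left < right then
    let mid := PySem.Int.floordiv (left + right) 2
    if can_distribute mid jewel_counts n then
      findLoop n jewel_counts left mid
    else
      findLoop n jewel_counts (mid + 1) right
  else left
termination_by (right - left).toNat
decreasing_by
  · have hb := PySem.Int.floordiv_two_mid_bounds (le_of_lt h) (lo := left) (hi := right)
    have hlt : PySem.Int.floordiv (left + right) 2 < right := by
      have := PySem.Int.floordiv_lt_iff_lt_mul (a := left + right) (b := 2) (q := right) (by omega)
      omega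
    omega
  · have hb := PySem.Int.floordiv_two_mid_bounds (le_of_lt h) (lo := left) (hi := right)
    omega

def find_min_jealousy (n : Int) (m : Int) (jewel_counts : List Int) : Int :=
  let right := (PySem.List.max? jewel_counts (fun x => x)).getD 0  -- none only outside Pre_
  findLoop n jewel_counts 1 right

-- ===== PORT B =====
-- First pass: the list of running prefix totals of (c + j - 1) // j.
def prefixTotals (j : Int) (t : Int) : List Int → List Int
  | [] => []
  | c :: rest =>
      let t' := t + PySem.Int.floordiv (c + j - 1) j
      t' :: prefixTotals j t' rest

-- Second pass: all prefix totals bounded by n.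
def feasibleB (n : Int) (xs : List Int) (j : Int) : Bool :=
  (prefixTotals j 0 xs).all (fun p => decide (p ≤ n))

def searchW (n : Int) (xs : List Int) (lo width : Int) : Int :=
  if h : width ≤ 0 then lo
  else
    let half := PySem.Int.floordiv width 2
    let mid := lo + half
    if feasibleB n xs mid then searchW n xs lo half
    else searchW n xs (mid + 1) (width - half - 1)
termination_by width.toNat
decreasing_by
  · have hb := PySem.Int.floordiv_two_mid_bounds (lo := 0) (hi := width) (by omega)
    have hlt : PySem.Int.floordiv width 2 < width := by
      have := PySem.Int.floordiv_lt_iff_lt_mul (a := width) (b := 2) (q := width) (by omega)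
      omega
    simp only [zero_add] at hb
    omega
  · have hb := PySem.Int.floordiv_two_mid_bounds (lo := 0) (hi := width) (by omega)
    simp only [zero_add] at hb
    omega

def find_min_jealousy_alt (n : Int) (m : Int) (jewel_counts : List Int) : Int :=
  searchW n jewel_counts 1 (((PySem.List.max? jewel_counts (fun x => x)).getD 0) - 1)

-- ===== PRECONDITION & SPEC =====
-- A raises ValueError (max of an empty sequence) on jewel_counts = []; excluded.
def Pre_find_min_jealousy (n : Int) (m : Int) (jewel_counts : List Int) : Prop :=
  jewel_counts ≠ []
instance (n : Int) (m : Int) (jewel_counts : List Int) : Decidable (Pre_find_min_jealousy n m jewel_counts) := by unfold Pre_find_min_jealousy; infer_instance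
def pvWitness_find_min_jealousy : Int × Int × List Int := (3, 1, [7, 2, 5])

def Spec_find_min_jealousy (n : Int) (m : Int) (jewel_counts : List Int) (out : Int) : Prop := out = find_min_jealousy_alt n m jewel_counts
instance (n : Int) (m : Int) (jewel_counts : List Int) (out : Int) : Decidable (Spec_find_min_jealousy n m jewel_counts out) := by unfold Spec_find_min_jealousy; infer_instance

-- ===== CLAIM (what is proved, stated in full; the proofs are below) =====
def Claim_equal_find_min_jealousy : Prop := ∀ (n : Int) (m : Int) (jewel_counts : List Int), Dom_find_min_jealousy n m jewel_counts → Pre_find_min_jealousy n m jewel_counts → Spec_find_min_jealousy n m jewel_counts (find_min_jealousy n m jewel_counts)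

-- ===== LEMMAS AND PROOFS =====

-- For a positive divisor, (c + j - 1) // j is the ceiling -((-c) // j).
theorem ceil_formula (c j : Int) (hj : 1 ≤ j) :
    PySem.Int.floordiv (c + j - 1) j = -(PySem.Int.floordiv (-c) j) := by
  have hb : (0:Int) < j := by omega
  have h := (PySem.Int.neg_floordiv_neg_eq_iff_of_pos (a := c) (b := j)
      (q := -(PySem.Int.floordiv (-c) j)) hb).mp rfl
  rw [PySem.Int.floordiv_eq_iff_of_pos hb]
  constructor <;> nlinarith [h.1, h.2]

-- B's staged prefix-totals test equals A's early-exit accumulation.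
theorem prefixTotals_all_eq (j n : Int) (hj : 1 ≤ j) (xs : List Int) :
    ∀ t : Int, ((prefixTotals j t xs).all (fun p => decide (p ≤ n))) = canDistributeGo j n t xs := by
  induction xs with
  | nil => intro t; rfl
  | cons c rest ih =>
      intro t
      simp only [prefixTotals, canDistributeGo, List.all_cons, ceil_formula c j hj]
      by_cases hcond : t + (-(PySem.Int.floordiv (-c) j)) > n
      · rw [if_pos hcond, decide_eq_false (by omega), Bool.false_and]
      · rw [if_neg hcond, decide_eq_true (by omega), Bool.true_and]
        exact ih _

theorem feasibleB_eq (n j : Int) (hj : 1 ≤ j) (xs : List Int) :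
    feasibleB n xs j = can_distribute j xs n := by
  unfold feasibleB can_distribute
  exact prefixTotals_all_eq j n hj xs 0

-- midpoint arithmetic: (lo + (lo + w)) // 2 = lo + w // 2
theorem mid_split (lo w : Int) :
    PySem.Int.floordiv (lo + (lo + w)) 2 = lo + PySem.Int.floordiv w 2 := by
  have h := (PySem.Int.floordiv_eq_iff_of_pos (a := w) (b := 2)
      (q := PySem.Int.floordiv w 2) (by omega)).mp rfl
  rw [PySem.Int.floordiv_eq_iff_of_pos (by omega)]
  omega

theorem searchW_eq_findLoop (n : Int) (xs : List Int) :
    ∀ lo width : Int, 1 ≤ lo → searchW n xs lo width = findLoop n xs lo (lo + width) := by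
  intro lo width
  induction lo, width using searchW.induct n xs with
  | case1 lo width h =>
      intro _
      rw [searchW, findLoop, dif_pos h, dif_neg (by omega)]
  | case2 lo width h half mid hfit ih =>
      intro hlo
      have hhb := (PySem.Int.floordiv_eq_iff_of_pos (a := width) (b := 2)
          (q := PySem.Int.floordiv width 2) (by omega)).mp rfl
      rw [searchW, findLoop, dif_neg h, dif_pos (by omega)]
      show (if feasibleB n xs mid then searchW n xs lo half else searchW n xs (mid + 1) (width - half - 1))
        = (if can_distribute (PySem.Int.floordiv (lo + (lo + width)) 2) xs n then
             findLoop n xs lo (PySem.Int.floordiv (lo + (lo + width)) 2)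
           else findLoop n xs (PySem.Int.floordiv (lo + (lo + width)) 2 + 1) (lo + width))
      rw [mid_split, feasibleB_eq n (lo + PySem.Int.floordiv width 2) (by omega) xs]
      have hc : can_distribute (lo + PySem.Int.floordiv width 2) xs n = true := by
        rw [← feasibleB_eq n _ (by omega) xs]; exact hfit
      rw [if_pos hc, if_pos hc]
      exact ih hlo
  | case3 lo width h half mid hfit ih =>
      intro hlo
      have hhb := (PySem.Int.floordiv_eq_iff_of_pos (a := width) (b := 2)
          (q := PySem.Int.floordiv width 2) (by omega)).mp rfl
      rw [searchW, findLoop, dif_neg h, dif_pos (by omega)]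
      show (if feasibleB n xs mid then searchW n xs lo half else searchW n xs (mid + 1) (width - half - 1))
        = (if can_distribute (PySem.Int.floordiv (lo + (lo + width)) 2) xs n then
             findLoop n xs lo (PySem.Int.floordiv (lo + (lo + width)) 2)
           else findLoop n xs (PySem.Int.floordiv (lo + (lo + width)) 2 + 1) (lo + width))
      rw [mid_split, feasibleB_eq n (lo + PySem.Int.floordiv width 2) (by omega) xs]
      have hc : ¬ can_distribute (lo + PySem.Int.floordiv width 2) xs n = true := by
        rw [← feasibleB_eq n _ (by omega) xs]; exact hfit
      rw [if_neg hc, if_neg hc]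
      have := ih (by omega)
      rw [this]
      congr 1
      omega

-- ===== VERDICT (by name: the statement is the Claim_ definition above) =====
theorem find_min_jealousy_spec : Claim_equal_find_min_jealousy := by
  intro n m jewel_counts _ _
  unfold Spec_find_min_jealousy find_min_jealousy find_min_jealousy_alt
  have h := searchW_eq_findLoop n jewel_counts 1 (((PySem.List.max? jewel_counts (fun x => x)).getD 0) - 1) (by omega)
  simp only [h]
  ring_nf
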